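-- pv_equiv track=rewrite | github.com/seligman/aoc | 2020/Helpers/day_01.py | calc
-- ===== SOURCE A (Python) =====
-- def calc(log, values, mode):
--     values = [int(x) for x in values]
--
--     if mode == 1:
--         for x in range(len(values)):
--             for y in range(x + 1, len(values)):
--                 if values[x] + values[y] == 2020:
--                     return values[x] * values[y]
--     else:
--         for x in range(len(values)):
--             for y in range(x + 1, len(values)):
--                 for z in range(y + 1, len(values)):
--                     if values[x] + values[y] + values[z] == 2020:
--                         return values[x] * values[y] * values[z]
--
--     return 10
-- ===== SOURCE B (Python) =====
-- def calc(log, values, mode):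
--     values = [int(x) for x in values]
--     if mode == 1:
--         cnt = {}
--         for v in values:
--             cnt[v] = cnt.get(v, 0) + 1
--         for v in values:
--             cnt[v] = cnt.get(v, 0) - 1
--             if cnt.get(2020 - v, 0) > 0:
--                 return v * (2020 - v)
--         return 10
--     else:
--         for x in range(len(values)):
--             vx = values[x]
--             rest = values[x + 1:]
--             cnt = {}
--             for w in rest:
--                 cnt[w] = cnt.get(w, 0) + 1
--             for vy in rest:
--                 cnt[vy] = cnt.get(vy, 0) - 1
--                 t = 2020 - vx - vy
--                 if cnt.get(t, 0) > 0:
--                     return vx * vy * t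
--         return 10
-- ===== Notes on version B (the rewrite author's own statement) =====
-- stated objective: faster
-- what changed: Replaces the brute-force O(n^2)/O(n^3) nested index scans with hash-counter sweeps: a counter of the remaining suffix is maintained (mode 1) or rebuilt per outer element (3-sum), so the innermost scan for the complement becomes a single dict lookup; the product only depends on the complement's value, so A's lexicographic first hit is preserved.
import Mathlib
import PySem

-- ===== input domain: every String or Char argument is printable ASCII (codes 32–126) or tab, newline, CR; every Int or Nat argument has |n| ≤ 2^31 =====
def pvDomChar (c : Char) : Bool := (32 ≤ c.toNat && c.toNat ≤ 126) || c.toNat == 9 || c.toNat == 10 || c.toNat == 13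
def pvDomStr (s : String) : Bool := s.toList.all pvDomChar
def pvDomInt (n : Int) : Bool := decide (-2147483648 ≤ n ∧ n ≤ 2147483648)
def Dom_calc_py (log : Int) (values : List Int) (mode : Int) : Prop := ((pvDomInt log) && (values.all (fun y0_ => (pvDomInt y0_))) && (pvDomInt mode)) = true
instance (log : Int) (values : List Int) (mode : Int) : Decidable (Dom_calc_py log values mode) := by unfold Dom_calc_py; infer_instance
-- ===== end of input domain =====

-- B replaces A's nested index scans by hash-counter sweeps (suffix counter + complement lookup): asymptotically faster, same value.

-- ===== PORT A =====
-- A, mode 1: 'for z in range(y+1, n)' innermost loop (mode != 1)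
def aLoopZ (vals : List Int) (x y : Int) : List Int → Option Int
  | [] => none
  | z :: zs =>
    if PySem.List.pyGetD vals x 0 + PySem.List.pyGetD vals y 0 + PySem.List.pyGetD vals z 0 == 2020 then
      some (PySem.List.pyGetD vals x 0 * PySem.List.pyGetD vals y 0 * PySem.List.pyGetD vals z 0)
    else aLoopZ vals x y zs

-- A, mode 1: 'for y in range(x+1, n)' loop
def aLoopY2 (vals : List Int) (x : Int) : List Int → Option Int
  | [] => none
  | y :: ys =>
    if PySem.List.pyGetD vals x 0 + PySem.List.pyGetD vals y 0 == 2020 then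
      some (PySem.List.pyGetD vals x 0 * PySem.List.pyGetD vals y 0)
    else aLoopY2 vals x ys

-- A, mode != 1: 'for y in range(x+1, n)' loop
def aLoopY3 (vals : List Int) (x : Int) : List Int → Option Int
  | [] => none
  | y :: ys =>
    match aLoopZ vals x y (PySem.List.pyRange (y + 1) ((vals.length : Int)) 1) with
    | some r => some r
    | none => aLoopY3 vals x ys

-- A, mode 1: 'for x in range(n)' loop
def aLoopX2 (vals : List Int) : List Int → Option Int
  | [] => none
  | x :: xs =>
    match aLoopY2 vals x (PySem.List.pyRange (x + 1) ((vals.length : Int)) 1) with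
    | some r => some r
    | none => aLoopX2 vals xs

-- A, mode != 1: 'for x in range(n)' loop
def aLoopX3 (vals : List Int) : List Int → Option Int
  | [] => none
  | x :: xs =>
    match aLoopY3 vals x (PySem.List.pyRange (x + 1) ((vals.length : Int)) 1) with
    | some r => some r
    | none => aLoopX3 vals xs

def calc_py (log : Int) (values : List Int) (mode : Int) : Int :=
  -- 'values = [int(x) for x in values]' is the identity on a list of ints
  if mode == 1 then
    match aLoopX2 values (PySem.List.pyRange 0 ((values.length : Int)) 1) with
    | some r => r
    | none => 10
  else
    match aLoopX3 values (PySem.List.pyRange 0 ((values.length : Int)) 1) with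
    | some r => r
    | none => 10

-- ===== PORT B =====
-- 'cnt = {}; for w in l: cnt[w] = cnt.get(w, 0) + 1'
def bCount (l : List Int) : PySem.Dict Int Int :=
  l.foldl (fun d w => d.insert w (d.getD w 0 + 1)) PySem.Dict.empty

-- mode 1 sweep: decrement the current value, look the complement up
def bSweep2 (cnt : PySem.Dict Int Int) : List Int → Option Int
  | [] => none
  | v :: vs =>
    let cnt' := cnt.insert v (cnt.getD v 0 - 1)
    if cnt'.getD (2020 - v) 0 > 0 then some (v * (2020 - v)) else bSweep2 cnt' vs

-- 3-sum inner sweep for a fixed first value vx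
def bSweep3 (vx : Int) (cnt : PySem.Dict Int Int) : List Int → Option Int
  | [] => none
  | vy :: vs =>
    let cnt' := cnt.insert vy (cnt.getD vy 0 - 1)
    if cnt'.getD (2020 - vx - vy) 0 > 0 then some (vx * vy * (2020 - vx - vy)) else bSweep3 vx cnt' vs

-- 'for x in range(len(values))' outer loop of the 3-sum branch
def bLoopX (vals : List Int) : List Int → Option Int
  | [] => none
  | x :: xs =>
    let vx := PySem.List.pyGetD vals x 0
    let rest := PySem.List.slice vals (some (x + 1)) none
    match bSweep3 vx (bCount rest) rest with
    | some r => some r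
    | none => bLoopX vals xs

def calc_py_alt (log : Int) (values : List Int) (mode : Int) : Int :=
  if mode == 1 then
    match bSweep2 (bCount values) values with
    | some r => r
    | none => 10
  else
    match bLoopX values (PySem.List.pyRange 0 ((values.length : Int)) 1) with
    | some r => r
    | none => 10

-- ===== PRECONDITION & SPEC =====
def Spec_calc_py (log : Int) (values : List Int) (mode : Int) (out : Int) : Prop := out = calc_py_alt log values mode
instance (log : Int) (values : List Int) (mode : Int) (out : Int) : Decidable (Spec_calc_py log values mode out) := by unfold Spec_calc_py; infer_instance

-- ===== CLAIM (what is proved, stated in full; the proofs are below) =====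
def Claim_equal_calc_py : Prop := ∀ (log : Int) (values : List Int) (mode : Int), Dom_calc_py log values mode → Spec_calc_py log values mode (calc_py log values mode)

-- ===== LEMMAS AND PROOFS =====

-- specification-level first-hit functions both ports reduce to
def spec2 : List Int → Option Int
  | [] => none
  | v :: rest => if (2020 - v) ∈ rest then some (v * (2020 - v)) else spec2 rest

def inner3 (vx : Int) : List Int → Option Int
  | [] => none
  | vy :: rest => if (2020 - vx - vy) ∈ rest then some (vx * vy * (2020 - vx - vy)) else inner3 vx rest

def spec3 : List Int → Option Int
  | [] => none
  | v :: rest =>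
    match inner3 v rest with
    | some r => some r
    | none => spec3 rest

theorem aLoopY2_eq (vals : List Int) (x : Int) (j : Nat) :
    aLoopY2 vals x (PySem.List.pyRange (j : Int) ((vals.length : Int)) 1) =
      (if (2020 - PySem.List.pyGetD vals x 0) ∈ vals.drop j then
        some (PySem.List.pyGetD vals x 0 * (2020 - PySem.List.pyGetD vals x 0)) else none) := by
  induction hn : vals.length - j generalizing j with
  | zero =>
    have hj : vals.length ≤ j := by omega
    rw [PySem.List.pyRange_one_eq_nil (by exact_mod_cast hj), List.drop_eq_nil_of_le hj]
    simp [aLoopY2]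
  | succ n ih =>
    have hj : j < vals.length := by omega
    have hget : PySem.List.pyGetD vals ((j : Nat) : Int) 0 = vals[j] := by
      rw [PySem.List.pyGetD_natCast]; exact List.getD_eq_getElem _ _ hj
    have hcast : ((j : Int) + 1) = ((j + 1 : Nat) : Int) := by push_cast; ring
    rw [PySem.List.pyRange_one_cons (by exact_mod_cast hj)]
    simp only [aLoopY2]
    rw [hcast, ih (j + 1) (by omega), List.drop_eq_getElem_cons hj, hget]
    simp only [beq_iff_eq, List.mem_cons]
    by_cases hv : vals[j] = 2020 - PySem.List.pyGetD vals x 0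
    · rw [if_pos (by omega), if_pos (Or.inl (by omega)), hv]
    · rw [if_neg (by omega)]
      have hne : ¬ (2020 - PySem.List.pyGetD vals x 0 = vals[j]) := by omega
      simp [hne]

theorem aLoopZ_eq (vals : List Int) (x y : Int) (j : Nat) :
    aLoopZ vals x y (PySem.List.pyRange (j : Int) ((vals.length : Int)) 1) =
      (if (2020 - PySem.List.pyGetD vals x 0 - PySem.List.pyGetD vals y 0) ∈ vals.drop j then
        some (PySem.List.pyGetD vals x 0 * PySem.List.pyGetD vals y 0 *
          (2020 - PySem.List.pyGetD vals x 0 - PySem.List.pyGetD vals y 0)) else none) := by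
  induction hn : vals.length - j generalizing j with
  | zero =>
    have hj : vals.length ≤ j := by omega
    rw [PySem.List.pyRange_one_eq_nil (by exact_mod_cast hj), List.drop_eq_nil_of_le hj]
    simp [aLoopZ]
  | succ n ih =>
    have hj : j < vals.length := by omega
    have hget : PySem.List.pyGetD vals ((j : Nat) : Int) 0 = vals[j] := by
      rw [PySem.List.pyGetD_natCast]; exact List.getD_eq_getElem _ _ hj
    have hcast : ((j : Int) + 1) = ((j + 1 : Nat) : Int) := by push_cast; ring
    rw [PySem.List.pyRange_one_cons (by exact_mod_cast hj)]
    simp only [aLoopZ]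
    rw [hcast, ih (j + 1) (by omega), List.drop_eq_getElem_cons hj, hget]
    simp only [beq_iff_eq, List.mem_cons]
    by_cases hv : vals[j] = 2020 - PySem.List.pyGetD vals x 0 - PySem.List.pyGetD vals y 0
    · rw [if_pos (by omega), if_pos (Or.inl (by omega)), hv]
    · rw [if_neg (by omega)]
      have hne : ¬ (2020 - PySem.List.pyGetD vals x 0 - PySem.List.pyGetD vals y 0 = vals[j]) := by
        omega
      simp [hne]

theorem aLoopY3_eq (vals : List Int) (x : Int) (j : Nat) :
    aLoopY3 vals x (PySem.List.pyRange (j : Int) ((vals.length : Int)) 1) =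
      inner3 (PySem.List.pyGetD vals x 0) (vals.drop j) := by
  induction hn : vals.length - j generalizing j with
  | zero =>
    have hj : vals.length ≤ j := by omega
    rw [PySem.List.pyRange_one_eq_nil (by exact_mod_cast hj), List.drop_eq_nil_of_le hj]
    simp [aLoopY3, inner3]
  | succ n ih =>
    have hj : j < vals.length := by omega
    have hget : PySem.List.pyGetD vals ((j : Nat) : Int) 0 = vals[j] := by
      rw [PySem.List.pyGetD_natCast]; exact List.getD_eq_getElem _ _ hj
    have hcast : ((j : Int) + 1) = ((j + 1 : Nat) : Int) := by push_cast; ring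
    rw [PySem.List.pyRange_one_cons (by exact_mod_cast hj)]
    simp only [aLoopY3]
    rw [hcast, aLoopZ_eq vals x ((j : Nat) : Int) (j + 1), hget,
      List.drop_eq_getElem_cons hj]
    simp only [inner3]
    by_cases hmem :
        (2020 - PySem.List.pyGetD vals x 0 - vals[j]) ∈ vals.drop (j + 1)
    · rw [if_pos hmem, if_pos hmem]
    · rw [if_neg hmem, if_neg hmem, ih (j + 1) (by omega)]

theorem aLoopX2_eq (vals : List Int) (j : Nat) :
    aLoopX2 vals (PySem.List.pyRange (j : Int) ((vals.length : Int)) 1) = spec2 (vals.drop j) := by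
  induction hn : vals.length - j generalizing j with
  | zero =>
    have hj : vals.length ≤ j := by omega
    rw [PySem.List.pyRange_one_eq_nil (by exact_mod_cast hj), List.drop_eq_nil_of_le hj]
    simp [aLoopX2, spec2]
  | succ n ih =>
    have hj : j < vals.length := by omega
    have hget : PySem.List.pyGetD vals ((j : Nat) : Int) 0 = vals[j] := by
      rw [PySem.List.pyGetD_natCast]; exact List.getD_eq_getElem _ _ hj
    have hcast : ((j : Int) + 1) = ((j + 1 : Nat) : Int) := by push_cast; ring
    rw [PySem.List.pyRange_one_cons (by exact_mod_cast hj)]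
    simp only [aLoopX2]
    rw [hcast, aLoopY2_eq vals ((j : Nat) : Int) (j + 1), hget,
      List.drop_eq_getElem_cons hj]
    simp only [spec2]
    by_cases hmem : (2020 - vals[j]) ∈ vals.drop (j + 1)
    · rw [if_pos hmem, if_pos hmem]
    · rw [if_neg hmem, if_neg hmem, ih (j + 1) (by omega)]

theorem aLoopX3_eq (vals : List Int) (j : Nat) :
    aLoopX3 vals (PySem.List.pyRange (j : Int) ((vals.length : Int)) 1) = spec3 (vals.drop j) := by
  induction hn : vals.length - j generalizing j with
  | zero =>
    have hj : vals.length ≤ j := by omega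
    rw [PySem.List.pyRange_one_eq_nil (by exact_mod_cast hj), List.drop_eq_nil_of_le hj]
    simp [aLoopX3, spec3]
  | succ n ih =>
    have hj : j < vals.length := by omega
    have hget : PySem.List.pyGetD vals ((j : Nat) : Int) 0 = vals[j] := by
      rw [PySem.List.pyGetD_natCast]; exact List.getD_eq_getElem _ _ hj
    have hcast : ((j : Int) + 1) = ((j + 1 : Nat) : Int) := by push_cast; ring
    rw [PySem.List.pyRange_one_cons (by exact_mod_cast hj)]
    simp only [aLoopX3]
    rw [hcast, aLoopY3_eq vals ((j : Nat) : Int) (j + 1), hget,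
      List.drop_eq_getElem_cons hj]
    simp only [spec3]
    cases hres : inner3 vals[j] (vals.drop (j + 1)) with
    | some r => rfl
    | none => exact ih (j + 1) (by omega)

theorem bCount_getD (l : List Int) (w : Int) : (bCount l).getD w 0 = (l.count w : Int) := by
  rw [bCount, PySem.Dict.getD_foldl_insert_add_one]
  simp

theorem bSweep2_eq (l : List Int) (cnt : PySem.Dict Int Int)
    (h : ∀ w, cnt.getD w 0 = (l.count w : Int)) : bSweep2 cnt l = spec2 l := by
  induction l generalizing cnt with
  | nil => simp [bSweep2, spec2]
  | cons v vs ih =>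
    have h' : ∀ w, (cnt.insert v (cnt.getD v 0 - 1)).getD w 0 = (vs.count w : Int) := by
      intro w
      rw [PySem.Dict.getD_insert]
      by_cases hw : w = v
      · rw [if_pos hw, h v, hw, List.count_cons_self]
        push_cast; ring
      · rw [if_neg hw, h w, List.count_cons_of_ne (fun e => hw e.symm)]
    simp only [bSweep2, spec2]
    rw [h' (2020 - v)]
    by_cases hmem : (2020 - v) ∈ vs
    · have : (0 : Int) < (vs.count (2020 - v) : Int) := by
        exact_mod_cast List.count_pos_iff.mpr hmem
      rw [if_pos this, if_pos hmem]
    · have : ¬ ((0 : Int) < (vs.count (2020 - v) : Int)) := by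
        simp [List.count_eq_zero_of_not_mem hmem]
      rw [if_neg this, if_neg hmem]
      exact ih _ h'

theorem bSweep3_eq (vx : Int) (l : List Int) (cnt : PySem.Dict Int Int)
    (h : ∀ w, cnt.getD w 0 = (l.count w : Int)) : bSweep3 vx cnt l = inner3 vx l := by
  induction l generalizing cnt with
  | nil => simp [bSweep3, inner3]
  | cons v vs ih =>
    have h' : ∀ w, (cnt.insert v (cnt.getD v 0 - 1)).getD w 0 = (vs.count w : Int) := by
      intro w
      rw [PySem.Dict.getD_insert]
      by_cases hw : w = v
      · rw [if_pos hw, h v, hw, List.count_cons_self]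
        push_cast; ring
      · rw [if_neg hw, h w, List.count_cons_of_ne (fun e => hw e.symm)]
    simp only [bSweep3, inner3]
    rw [h' (2020 - vx - v)]
    by_cases hmem : (2020 - vx - v) ∈ vs
    · have : (0 : Int) < (vs.count (2020 - vx - v) : Int) := by
        exact_mod_cast List.count_pos_iff.mpr hmem
      rw [if_pos this, if_pos hmem]
    · have : ¬ ((0 : Int) < (vs.count (2020 - vx - v) : Int)) := by
        simp [List.count_eq_zero_of_not_mem hmem]
      rw [if_neg this, if_neg hmem]
      exact ih _ h'

theorem bLoopX_eq (vals : List Int) (j : Nat) :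
    bLoopX vals (PySem.List.pyRange (j : Int) ((vals.length : Int)) 1) = spec3 (vals.drop j) := by
  induction hn : vals.length - j generalizing j with
  | zero =>
    have hj : vals.length ≤ j := by omega
    rw [PySem.List.pyRange_one_eq_nil (by exact_mod_cast hj), List.drop_eq_nil_of_le hj]
    simp [bLoopX, spec3]
  | succ n ih =>
    have hj : j < vals.length := by omega
    have hget : PySem.List.pyGetD vals ((j : Nat) : Int) 0 = vals[j] := by
      rw [PySem.List.pyGetD_natCast]; exact List.getD_eq_getElem _ _ hj
    have hcast : ((j : Int) + 1) = ((j + 1 : Nat) : Int) := by push_cast; ring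
    rw [PySem.List.pyRange_one_cons (by exact_mod_cast hj)]
    simp only [bLoopX]
    rw [hcast, PySem.List.slice_from_natCast, hget,
      bSweep3_eq vals[j] (vals.drop (j + 1)) _ (fun w => bCount_getD (vals.drop (j + 1)) w),
      List.drop_eq_getElem_cons hj]
    simp only [spec3]
    cases hres : inner3 vals[j] (vals.drop (j + 1)) with
    | some r => rfl
    | none => exact ih (j + 1) (by omega)
-- ===== VERDICT (by name: the statement is the Claim_ definition above) =====
theorem calc_py_spec : Claim_equal_calc_py := by
  intro log values mode _
  unfold Spec_calc_py calc_py calc_py_alt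
  by_cases h : mode == 1 <;> simp only [h, if_true, if_false, Bool.false_eq_true]
  · rw [show (0 : Int) = ((0 : Nat) : Int) from rfl, aLoopX2_eq,
      bSweep2_eq values (bCount values) (bCount_getD values), List.drop_zero]
  · rw [show (0 : Int) = ((0 : Nat) : Int) from rfl, aLoopX3_eq, bLoopX_eq, List.drop_zero]
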